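-- pv_equiv track=rewrite | github.com/UVA-dot/INF_LAB3 | Lab4(1).py | func_check_if_list_or_tag
-- ===== SOURCE A (Python) =====
-- def func_check_if_list_or_tag(s: list, t: str, i: int, k: int, cnt_tab: int, cnt_sp: int):
--     if i == len(s):
--         if k == 2:
--             return 0
--         else:
--             return 1
--     elif cnt_tab * '\t' + cnt_sp * ' ' + t in s[i][:s[i].find('<')] :
--         return func_check_if_list_or_tag(s, t, i + 1, k + 1, cnt_tab, cnt_sp)
--     else:
--         return func_check_if_list_or_tag(s, t, i + 1, k, cnt_tab, cnt_sp)
-- ===== SOURCE B (Python) =====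
-- def func_check_if_list_or_tag(s: list, t: str, i: int, k: int, cnt_tab: int, cnt_sp: int):
--     if i != len(s):
--         pre = cnt_tab * '\t' + cnt_sp * ' ' + t
--         while i != len(s):
--             line = s[i]
--             if pre in line[:line.find('<')]:
--                 k += 1
--             i += 1
--     return 0 if k == 2 else 1
-- ===== Notes on version B (the rewrite author's own statement) =====
-- stated objective: simpler
-- what changed: Replaces the self-recursive scan (which rebuilds the needle string at every call and threads the verdict through the recursion) with a single iterative while-loop that computes the needle once, counts matches into k, and decides 0/1 after the loop.
import Mathlib
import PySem

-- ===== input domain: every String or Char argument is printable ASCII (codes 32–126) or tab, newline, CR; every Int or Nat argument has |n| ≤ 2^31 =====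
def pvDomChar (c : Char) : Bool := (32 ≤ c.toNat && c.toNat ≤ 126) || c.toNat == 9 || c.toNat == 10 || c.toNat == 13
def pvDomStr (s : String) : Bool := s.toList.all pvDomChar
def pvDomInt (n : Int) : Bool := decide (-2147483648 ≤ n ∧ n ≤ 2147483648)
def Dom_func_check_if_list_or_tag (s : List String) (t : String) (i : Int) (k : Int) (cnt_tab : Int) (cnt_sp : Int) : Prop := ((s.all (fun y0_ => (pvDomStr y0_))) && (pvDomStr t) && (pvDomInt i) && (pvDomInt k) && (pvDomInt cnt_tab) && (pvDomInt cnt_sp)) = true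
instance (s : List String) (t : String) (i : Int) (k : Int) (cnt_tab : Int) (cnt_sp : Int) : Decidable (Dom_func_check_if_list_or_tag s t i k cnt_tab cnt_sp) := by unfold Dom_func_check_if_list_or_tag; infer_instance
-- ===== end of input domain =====

-- B replaces A's self-recursion (needle rebuilt at every call, verdict threaded through
-- the recursion) by one while-loop that builds the needle once, counts matches, and
-- decides 0/1 after the loop; objective: simpler.

-- pyGet? succeeds only on indices below the length (used for termination of both ports)
theorem pvGet_lt {α : Type} (xs : List α) (i : Int) (x : α)
    (h : PySem.List.pyGet? xs i = some x) : i < xs.length := by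
  simp only [PySem.List.pyGet?, PySem.List.pyIdx?] at h
  split_ifs at h <;> simp_all [List.getElem?_eq_some_iff] <;> omega

-- ===== PORT A =====
def func_check_if_list_or_tag (s : List String) (t : String) (i : Int) (k : Int) (cnt_tab : Int) (cnt_sp : Int) : Int :=
  if i = (s.length : Int) then
    if k = 2 then 0 else 1
  else
    match h : PySem.List.pyGet? s i with
    | none => 0  -- Python raises IndexError here; excluded by Pre_
    | some line =>
      if PySem.Chars.isIn
           (PySem.List.pyRepeat ['\t'] cnt_tab ++ PySem.List.pyRepeat [' '] cnt_sp ++ t.toList)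
           (PySem.Chars.slice line.toList none (some (PySem.Chars.find line.toList ['<']))) then
        func_check_if_list_or_tag s t (i + 1) (k + 1) cnt_tab cnt_sp
      else
        func_check_if_list_or_tag s t (i + 1) k cnt_tab cnt_sp
termination_by (((s.length : Int) - i).toNat)
decreasing_by
  · have := pvGet_lt s i line h; omega
  · have := pvGet_lt s i line h; omega

-- ===== PORT B =====
-- the while-loop of Source B: count matching lines into k, stop when i reaches len(s)
def pvAltLoop (s : List String) (pre : List Char) (i : Int) (k : Int) : Int :=
  if i = (s.length : Int) then k
  else
    match h : PySem.List.pyGet? s i with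
    | none => k  -- Python raises IndexError here; excluded by Pre_
    | some line =>
      pvAltLoop s pre (i + 1)
        (if PySem.Chars.isIn pre
              (PySem.Chars.slice line.toList none (some (PySem.Chars.find line.toList ['<'])))
         then k + 1 else k)
termination_by (((s.length : Int) - i).toNat)
decreasing_by
  have := pvGet_lt s i line h; omega

def func_check_if_list_or_tag_alt (s : List String) (t : String) (i : Int) (k : Int) (cnt_tab : Int) (cnt_sp : Int) : Int :=
  -- Source B builds the needle (and runs the loop) only when there is a line to scan
  let kf :=
    if i ≠ (s.length : Int) then
      pvAltLoop s (PySem.List.pyRepeat ['\t'] cnt_tab ++ PySem.List.pyRepeat [' '] cnt_sp ++ t.toList) i k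
    else k
  if kf = 2 then 0 else 1

-- ===== PRECONDITION & SPEC =====
-- Pre_ excludes exactly the indices i on which Python A raises IndexError (i past the
-- list in either direction); Python's negative indices down to -len(s) wrap and are kept.
def Pre_func_check_if_list_or_tag (s : List String) (t : String) (i : Int) (k : Int) (cnt_tab : Int) (cnt_sp : Int) : Prop :=
  -(s.length : Int) ≤ i ∧ i ≤ (s.length : Int)
instance (s : List String) (t : String) (i : Int) (k : Int) (cnt_tab : Int) (cnt_sp : Int) : Decidable (Pre_func_check_if_list_or_tag s t i k cnt_tab cnt_sp) := by unfold Pre_func_check_if_list_or_tag; infer_instance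

def pvWitness_func_check_if_list_or_tag : List String × String × Int × Int × Int × Int :=
  (["ab<c", "x"], "ab", 0, 0, 0, 0)

def Spec_func_check_if_list_or_tag (s : List String) (t : String) (i : Int) (k : Int) (cnt_tab : Int) (cnt_sp : Int) (out : Int) : Prop := out = func_check_if_list_or_tag_alt s t i k cnt_tab cnt_sp
instance (s : List String) (t : String) (i : Int) (k : Int) (cnt_tab : Int) (cnt_sp : Int) (out : Int) : Decidable (Spec_func_check_if_list_or_tag s t i k cnt_tab cnt_sp out) := by unfold Spec_func_check_if_list_or_tag; infer_instance

-- ===== CLAIM (what is proved, stated in full; the proofs are below) =====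
def Claim_equal_func_check_if_list_or_tag : Prop := ∀ (s : List String) (t : String) (i : Int) (k : Int) (cnt_tab : Int) (cnt_sp : Int), Dom_func_check_if_list_or_tag s t i k cnt_tab cnt_sp → Pre_func_check_if_list_or_tag s t i k cnt_tab cnt_sp → Spec_func_check_if_list_or_tag s t i k cnt_tab cnt_sp (func_check_if_list_or_tag s t i k cnt_tab cnt_sp)

-- ===== LEMMAS AND PROOFS =====

-- in-range indices always fetch a line
theorem pvGet_isSome (xs : List String) (i : Int)
    (hlo : -(xs.length : Int) ≤ i) (hhi : i < (xs.length : Int)) :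
    ∃ x, PySem.List.pyGet? xs i = some x := by
  simp only [PySem.List.pyGet?, PySem.List.pyIdx?]
  split_ifs <;> simp_all [List.getElem?_eq_some_iff] <;> omega

-- one-step unfolding of A's recursion when the fetch succeeds
theorem pvA_step (s : List String) (t : String) (i k cnt_tab cnt_sp : Int) (line : String)
    (hi : i ≠ (s.length : Int)) (hg : PySem.List.pyGet? s i = some line) :
    func_check_if_list_or_tag s t i k cnt_tab cnt_sp =
      (if PySem.Chars.isIn
            (PySem.List.pyRepeat ['\t'] cnt_tab ++ PySem.List.pyRepeat [' '] cnt_sp ++ t.toList)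
            (PySem.Chars.slice line.toList none (some (PySem.Chars.find line.toList ['<']))) then
        func_check_if_list_or_tag s t (i + 1) (k + 1) cnt_tab cnt_sp
      else
        func_check_if_list_or_tag s t (i + 1) k cnt_tab cnt_sp) := by
  rw [func_check_if_list_or_tag]
  rw [if_neg hi]
  split <;> rename_i h
  · rw [h] at hg; cases hg
  · rw [h] at hg; cases hg; rfl

-- one-step unfolding of B's loop when the fetch succeeds
theorem pvB_step (s : List String) (pre : List Char) (i k : Int) (line : String)
    (hi : i ≠ (s.length : Int)) (hg : PySem.List.pyGet? s i = some line) :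
    pvAltLoop s pre i k =
      pvAltLoop s pre (i + 1)
        (if PySem.Chars.isIn pre
              (PySem.Chars.slice line.toList none (some (PySem.Chars.find line.toList ['<'])))
         then k + 1 else k) := by
  rw [pvAltLoop]
  rw [if_neg hi]
  split <;> rename_i h
  · rw [h] at hg; cases hg
  · rw [h] at hg; cases hg; rfl

-- A's recursion equals "decide 0/1 after B's counting loop", for every in-range i
theorem pvA_eq_loop (s : List String) (t : String) (cnt_tab cnt_sp : Int) :
    ∀ (n : Nat) (i k : Int), ((s.length : Int) - i).toNat = n → -(s.length : Int) ≤ i → i ≤ (s.length : Int) →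
      func_check_if_list_or_tag s t i k cnt_tab cnt_sp =
        (if pvAltLoop s (PySem.List.pyRepeat ['\t'] cnt_tab ++ PySem.List.pyRepeat [' '] cnt_sp ++ t.toList) i k = 2 then 0 else 1) := by
  intro n
  induction n with
  | zero =>
    intro i k hn hlo hhi
    have hi : i = (s.length : Int) := by omega
    rw [func_check_if_list_or_tag, pvAltLoop]
    simp [hi]
  | succ m ih =>
    intro i k hn hlo hhi
    have hi : i ≠ (s.length : Int) := by omega
    obtain ⟨line, hg⟩ := pvGet_isSome s i hlo (by omega)
    rw [pvA_step s t i k cnt_tab cnt_sp line hi hg,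
        pvB_step s _ i k line hi hg]
    split <;>
      exact ih (i + 1) _ (by omega) (by omega) (by omega)

-- ===== VERDICT (by name: the statement is the Claim_ definition above) =====
theorem func_check_if_list_or_tag_spec : Claim_equal_func_check_if_list_or_tag := by
  intro s t i k cnt_tab cnt_sp _hdom hpre
  unfold Spec_func_check_if_list_or_tag func_check_if_list_or_tag_alt
  by_cases hi : i = (s.length : Int)
  · simp only [hi, ne_eq, not_true_eq_false, if_false]
    rw [func_check_if_list_or_tag]
    simp
  · simp only [ne_eq, hi, not_false_eq_true, if_true]
    exact pvA_eq_loop s t cnt_tab cnt_sp (((s.length : Int) - i).toNat) i k rfl hpre.1 hpre.2
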